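-- pv_equiv track=rewrite | github.com/spiralgenetics/biograph | python/demo/toy_biograph.py | rm_prefixes
-- ===== SOURCE A (Python) =====
-- def rm_prefixes(sequences):
--     """
--     Remove sequences which are prefixes of another sequence.
--     This process can be done by linearly scanning the list and removing any element which
--     is a prefix of or identical to the next element
--     """
--     i = 0
--     while i < len(sequences) - 1:
--         if sequences[i + 1].startswith(sequences[i]):
--             del(sequences[i])
--         else:
--             i += 1
--     return sequences
-- ===== SOURCE B (Python) =====
-- def rm_prefixes(sequences):
--     # One forward pass over adjacent pairs; A mutates its argument in place,
--     # B does not (equivalence is about the return value).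
--     out = [a for a, b in zip(sequences, sequences[1:]) if not b.startswith(a)]
--     out.extend(sequences[-1:])
--     return out
-- ===== Notes on version B (the rewrite author's own statement) =====
-- stated objective: faster
-- what changed: Replaces the while-loop with repeated del (each O(n) shift) by a single pass over adjacent pairs that keeps an element unless its successor starts with it, appending the last element.
import Mathlib
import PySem

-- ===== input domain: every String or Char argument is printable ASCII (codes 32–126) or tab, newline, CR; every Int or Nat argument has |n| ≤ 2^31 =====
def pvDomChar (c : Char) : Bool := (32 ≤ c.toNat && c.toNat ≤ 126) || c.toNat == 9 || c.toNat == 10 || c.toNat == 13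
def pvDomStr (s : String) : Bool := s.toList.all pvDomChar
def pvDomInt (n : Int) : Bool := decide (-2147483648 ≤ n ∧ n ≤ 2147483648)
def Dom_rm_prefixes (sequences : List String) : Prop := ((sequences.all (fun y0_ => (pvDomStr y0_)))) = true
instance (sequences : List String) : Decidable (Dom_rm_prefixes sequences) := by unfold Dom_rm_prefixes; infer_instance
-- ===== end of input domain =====

-- B replaces A's while-loop with repeated in-place del by one pass over adjacent
-- pairs (A mutates its argument; equivalence here is about the return value only).

-- ===== PORT A =====
-- the while-loop of A: state is the (mutated) list and the index i
def rm_prefixes_loop (sequences : List String) (i : Nat) : List String :=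
  if h : i < sequences.length - 1 then
    if PySem.Str.startswith ((PySem.List.pyGet? sequences ((i : Int) + 1)).getD "")
        ((PySem.List.pyGet? sequences (i : Int)).getD "") then
      rm_prefixes_loop (sequences.eraseIdx i) i
    else
      rm_prefixes_loop sequences (i + 1)
  else sequences
termination_by sequences.length - i
decreasing_by
  · have hi : i < sequences.length := by omega
    simp [List.length_eraseIdx, hi]; omega
  · omega

def rm_prefixes (sequences : List String) : List String :=
  rm_prefixes_loop sequences 0

-- ===== PORT B =====
def rm_prefixes_alt (sequences : List String) : List String :=
  ((sequences.zip (PySem.List.slice sequences (some 1) none)).filter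
      (fun p => !PySem.Str.startswith p.2 p.1)).map Prod.fst
    ++ PySem.List.slice sequences (some (-1)) none

-- ===== PRECONDITION & SPEC =====
def Spec_rm_prefixes (sequences : List String) (out : List String) : Prop := out = rm_prefixes_alt sequences
instance (sequences : List String) (out : List String) : Decidable (Spec_rm_prefixes sequences out) := by unfold Spec_rm_prefixes; infer_instance

-- ===== CLAIM (what is proved, stated in full; the proofs are below) =====
def Claim_equal_rm_prefixes : Prop := ∀ (sequences : List String), Dom_rm_prefixes sequences → Spec_rm_prefixes sequences (rm_prefixes sequences)

-- ===== LEMMAS AND PROOFS =====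

-- B on nil and singleton
theorem alt_nil : rm_prefixes_alt [] = [] := by
  simp [rm_prefixes_alt, PySem.List.slice_from_neg_one, PySem.List.slice_from_one]

theorem alt_single (a : String) : rm_prefixes_alt [a] = [a] := by
  simp [rm_prefixes_alt, PySem.List.slice_from_neg_one, PySem.List.slice_from_one]

-- B's step on a list with at least two elements
theorem alt_cons (a b : String) (rest : List String) :
    rm_prefixes_alt (a :: b :: rest) =
      (if PySem.Str.startswith b a then [] else [a]) ++ rm_prefixes_alt (b :: rest) := by
  have hdrop : (a :: b :: rest).drop ((a :: b :: rest).length - 1)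
      = (b :: rest).drop ((b :: rest).length - 1) := by
    simp [List.length_cons]
  rw [rm_prefixes_alt, rm_prefixes_alt, PySem.List.slice_from_one, PySem.List.slice_from_one,
    PySem.List.slice_from_neg_one, PySem.List.slice_from_neg_one, hdrop]
  simp only [List.tail_cons, List.zip_cons_cons, List.filter_cons]
  by_cases h : PySem.Chars.startswith b.toList a.toList = true <;> simp [h]

-- drop i of a list with i < len - 1 has the shape a :: b :: rest
theorem drop_shape (xs : List String) (i : Nat) (h : i < xs.length - 1) :
    xs.drop i = xs[i]'(by omega) :: xs[i+1]'(by omega) :: xs.drop (i+2) := by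
  have h1 : i < xs.length := by omega
  have h2 : i + 1 < xs.length := by omega
  rw [List.drop_eq_getElem_cons h1, List.drop_eq_getElem_cons h2]

-- main invariant of A's loop
theorem loop_eq (n : ℕ) (xs : List String) (i : Nat) (hn : xs.length - i ≤ n) :
    rm_prefixes_loop xs i = xs.take i ++ rm_prefixes_alt (xs.drop i) := by
  induction n generalizing xs i with
  | zero =>
    rw [rm_prefixes_loop, dif_neg (by omega : ¬ i < xs.length - 1),
      List.drop_eq_nil_of_le (by omega), alt_nil, List.append_nil,
      List.take_of_length_le (by omega)]
  | succ n ih =>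
    rw [rm_prefixes_loop]
    by_cases hlt : i < xs.length - 1
    · have hi : i < xs.length := by omega
      have hi1 : i + 1 < xs.length := by omega
      have hd := drop_shape xs i hlt
      set a := xs[i]'(by omega) with ha
      set b := xs[i+1]'(by omega) with hb
      have hga : (PySem.List.pyGet? xs (i : Int)).getD "" = a := by
        rw [PySem.List.pyGet?_natCast, List.getElem?_eq_getElem hi, Option.getD_some]
      have hgb : (PySem.List.pyGet? xs ((i : Int) + 1)).getD "" = b := by
        rw [show ((i : Int) + 1) = ((i + 1 : Nat) : Int) by omega, PySem.List.pyGet?_natCast,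
          List.getElem?_eq_getElem hi1, Option.getD_some]
      have hbridge : PySem.Str.startswith b a = PySem.Chars.startswith b.toList a.toList := by
        simp
      rw [dif_pos hlt, hga, hgb, hbridge]
      have hdr1 : xs.drop (i + 1) = b :: xs.drop (i + 2) := by
        rw [List.drop_eq_getElem_cons hi1]
      by_cases hsw : PySem.Chars.startswith b.toList a.toList = true
      · rw [if_pos hsw]
        have herase : xs.eraseIdx i = xs.take i ++ (b :: xs.drop (i + 2)) := by
          rw [List.eraseIdx_eq_take_drop_succ, hdr1]
        rw [ih (xs.eraseIdx i) i (by simp [List.length_eraseIdx, hi]; omega)]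
        have htk : (xs.eraseIdx i).take i = xs.take i := by
          rw [herase, List.take_append_of_le_length (by simp [List.length_take]; omega)]
          simp [List.take_take]
        have hdr : (xs.eraseIdx i).drop i = b :: xs.drop (i + 2) := by
          rw [herase, List.drop_append_of_le_length (by simp [List.length_take]; omega)]
          simp
        rw [htk, hdr, hd, alt_cons]
        simp [hsw]
      · rw [if_neg hsw]
        rw [ih xs (i + 1) (by omega)]
        have htk : xs.take (i + 1) = xs.take i ++ [a] := by
          rw [List.take_add_one, List.getElem?_eq_getElem hi]
          simp [ha]
        rw [htk, hdr1, hd, alt_cons]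
        simp [hsw]
    · rw [dif_neg hlt]
      rcases Nat.lt_or_ge i xs.length with hi | hi
      · have hdr : xs.drop i = [xs[i]] := by
          rw [List.drop_eq_getElem_cons hi, List.drop_eq_nil_of_le (by omega)]
        rw [hdr, alt_single]
        have h1 : xs.take (i + 1) = xs.take i ++ [xs[i]] := by
          rw [List.take_add_one, List.getElem?_eq_getElem hi]
          simp
        rw [← h1, List.take_of_length_le (by omega)]
      · rw [List.drop_eq_nil_of_le hi, alt_nil, List.append_nil,
          List.take_of_length_le hi]

-- ===== VERDICT (by name: the statement is the Claim_ definition above) =====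
theorem rm_prefixes_spec : Claim_equal_rm_prefixes := by
  intro sequences _
  unfold Spec_rm_prefixes rm_prefixes
  simpa using loop_eq sequences.length sequences 0 (by omega)
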